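-- pv_equiv track=rewrite | github.com/elbachir67/trans-neur-emb-sem-pre-meta-trans | rdbms_transformation.py | transform_ecore_to_rdbms
-- ===== SOURCE A (Python) =====
-- def transform_ecore_to_rdbms(ecore_content):
--     """
--     Transforme un modèle Ecore en modèle RDBMS.
--     """
--     rdbms_lines = []
--
--     # Parse Ecore content
--     ecore_elements = {}
--
--     for line in ecore_content.split('\n'):
--         line = line.strip()
--         if not line:
--             continue
--
--         if ':' in line:
--             parts = line.split(':', 1)
--             if len(parts) == 2:
--                 element_name = parts[0].strip()
--                 element_type = parts[1].strip()
--
--                 ecore_elements[element_name] = element_type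
--
--     # 1. Transformer les EClass en tables
--     for element_name, element_type in ecore_elements.items():
--         if element_type == 'EClass':
--             table_name = element_name.replace('EClass', '')
--             rdbms_lines.append(f"{table_name}: Table")
--
--     # 2. Transformer les EAttribute en colonnes
--     for element_name, element_type in ecore_elements.items():
--         if element_type == 'EAttribute':
--             column_name = element_name.replace('EAttribute', '')
--
--             # Si l'attribut contient "id", le considérer comme une clé primaire
--             if 'id' in element_name.lower():
--                 rdbms_lines.append(f"{column_name}: Column")
--                 rdbms_lines.append(f"PK_{column_name}: PrimaryKey")
--             else:
--                 rdbms_lines.append(f"{column_name}: Column")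
--
--     # 3. Transformer les EReference en clés étrangères
--     for element_name, element_type in ecore_elements.items():
--         if element_type == 'EReference':
--             fk_name = element_name.replace('EReference', '') + '_FK'
--             rdbms_lines.append(f"{fk_name}: ForeignKey")
--
--     # 4. Transformer les EOperation en procédures stockées
--     for element_name, element_type in ecore_elements.items():
--         if element_type == 'EOperation':
--             operation_name = element_name.replace('EOperation', '')
--             rdbms_lines.append(f"{operation_name}: StoredProcedure")
--
--     # 5. Ajouter un schéma par défaut
--     rdbms_lines.append(f"MainSchema: Schema")
--
--     return '\n'.join(rdbms_lines)
-- ===== SOURCE B (Python) =====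
-- def transform_ecore_to_rdbms(ecore_content):
--     """One classifying pass into four buckets instead of four full re-scans."""
--     elements = {}
--     for raw in ecore_content.split('\n'):
--         parts = raw.strip().split(':', 1)
--         if len(parts) == 2:
--             elements[parts[0].strip()] = parts[1].strip()
--
--     tables, columns, fks, procs = [], [], [], []
--     for name, typ in elements.items():
--         if typ == 'EClass':
--             tables.append(name.replace('EClass', '') + ': Table')
--         elif typ == 'EAttribute':
--             col = name.replace('EAttribute', '')
--             if 'id' in name.lower():
--                 columns.append(col + ': Column')
--                 columns.append('PK_' + col + ': PrimaryKey')
--             else: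
--                 columns.append(col + ': Column')
--         elif typ == 'EReference':
--             fks.append(name.replace('EReference', '') + '_FK: ForeignKey')
--         elif typ == 'EOperation':
--             procs.append(name.replace('EOperation', '') + ': StoredProcedure')
--
--     return '\n'.join(tables + columns + fks + procs + ['MainSchema: Schema'])
-- ===== Notes on version B (the rewrite author's own statement) =====
-- stated objective: alternative
-- what changed: Replaces A's four full re-scans of the parsed element dict (one per element type) by a single classifying pass that routes each element's emitted line(s) into one of four order-preserving buckets, concatenated afterwards; the parse loop drops the redundant emptiness and colon-membership pre-checks in favour of a single length-2 test on the split.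
import Mathlib
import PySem

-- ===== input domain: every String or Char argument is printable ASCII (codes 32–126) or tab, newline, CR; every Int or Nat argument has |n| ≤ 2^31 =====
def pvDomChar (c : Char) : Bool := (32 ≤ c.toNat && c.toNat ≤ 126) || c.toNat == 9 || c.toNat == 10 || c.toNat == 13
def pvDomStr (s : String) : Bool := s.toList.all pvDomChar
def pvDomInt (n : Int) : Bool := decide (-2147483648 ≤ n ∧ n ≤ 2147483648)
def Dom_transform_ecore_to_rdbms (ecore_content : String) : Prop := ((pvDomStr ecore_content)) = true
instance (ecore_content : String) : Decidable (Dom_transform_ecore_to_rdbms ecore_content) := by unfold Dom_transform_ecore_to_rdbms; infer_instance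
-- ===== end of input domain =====

-- B replaces A's four full re-scans of the parsed element dict by one classifying pass
-- into four buckets (objective: alternative decomposition, same asymptotic cost).

-- ===== PORT A =====
-- A-side helper: the per-line parse step (line.strip(); skip empty / no-':' lines;
-- line.split(':', 1) — the len(parts) == 2 check is the pattern [p0, p1])
def pvParseA (d : PySem.Dict String String) (line0 : String) : PySem.Dict String String :=
  let line := PySem.Str.strip line0
  if line == "" then d
  else if PySem.Str.isIn ":" line then
    match PySem.Str.splitMax? line ":" 1 with
    | some [p0, p1] => d.insert (PySem.Str.strip p0) (PySem.Str.strip p1)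
    | _ => d
  else d

def transform_ecore_to_rdbms (ecore_content : String) : String :=
  -- ecore_elements = the parsed dict (sep "\n" ≠ "", so split? is `some`; .getD [] unwraps);
  -- then rdbms_lines after the four scans (1. EClass→Table, 2. EAttribute→Column/PK,
  -- 3. EReference→ForeignKey, 4. EOperation→StoredProcedure) and the default schema
  PySem.Str.join "\n"
    (((((PySem.Str.split? ecore_content "\n").getD []).foldl pvParseA PySem.Dict.empty).items.foldl (fun acc it =>
        if it.2 == "EOperation" then acc ++ [PySem.Str.replace it.1 "EOperation" "" ++ ": StoredProcedure"]
        else acc)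
      ((((PySem.Str.split? ecore_content "\n").getD []).foldl pvParseA PySem.Dict.empty).items.foldl (fun acc it =>
        if it.2 == "EReference" then acc ++ [PySem.Str.replace it.1 "EReference" "" ++ "_FK" ++ ": ForeignKey"]
        else acc)
      ((((PySem.Str.split? ecore_content "\n").getD []).foldl pvParseA PySem.Dict.empty).items.foldl (fun acc it =>
        if it.2 == "EAttribute" then
          let column_name := PySem.Str.replace it.1 "EAttribute" ""
          if PySem.Str.isIn "id" (PySem.Str.lower it.1) then
            acc ++ [column_name ++ ": Column"] ++ ["PK_" ++ column_name ++ ": PrimaryKey"]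
          else acc ++ [column_name ++ ": Column"]
        else acc)
      ((((PySem.Str.split? ecore_content "\n").getD []).foldl pvParseA PySem.Dict.empty).items.foldl (fun acc it =>
        if it.2 == "EClass" then acc ++ [PySem.Str.replace it.1 "EClass" "" ++ ": Table"]
        else acc) ([] : List String))))) ++ ["MainSchema: Schema"])

-- ===== PORT B =====
-- B-side helper: the single classification step (one bucket 4-tuple: tables, columns, fks, procs)
def pvClassify (bs : List String × List String × List String × List String)
    (it : String × String) : List String × List String × List String × List String :=
  if it.2 == "EClass" then
    (bs.1 ++ [PySem.Str.replace it.1 "EClass" "" ++ ": Table"], bs.2.1, bs.2.2.1, bs.2.2.2)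
  else if it.2 == "EAttribute" then
    let col := PySem.Str.replace it.1 "EAttribute" ""
    if PySem.Str.isIn "id" (PySem.Str.lower it.1) then
      (bs.1, bs.2.1 ++ [col ++ ": Column", "PK_" ++ col ++ ": PrimaryKey"], bs.2.2.1, bs.2.2.2)
    else (bs.1, bs.2.1 ++ [col ++ ": Column"], bs.2.2.1, bs.2.2.2)
  else if it.2 == "EReference" then
    (bs.1, bs.2.1, bs.2.2.1 ++ [PySem.Str.replace it.1 "EReference" "" ++ "_FK: ForeignKey"], bs.2.2.2)
  else if it.2 == "EOperation" then
    (bs.1, bs.2.1, bs.2.2.1, bs.2.2.2 ++ [PySem.Str.replace it.1 "EOperation" "" ++ ": StoredProcedure"])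
  else bs

-- B-side helper: parse step — raw.strip().split(':', 1); keep the pair iff the split has two parts
def pvParseB (d : PySem.Dict String String) (raw : String) : PySem.Dict String String :=
  match PySem.Str.splitMax? (PySem.Str.strip raw) ":" 1 with
  | some [p0, p1] => d.insert (PySem.Str.strip p0) (PySem.Str.strip p1)
  | _ => d

def transform_ecore_to_rdbms_alt (ecore_content : String) : String :=
  -- parse (sep "\n" ≠ "", so split? is `some`; .getD [] unwraps), then one classifying
  -- pass into the four buckets, then concatenate in A's emission order
  match (((PySem.Str.split? ecore_content "\n").getD []).foldl pvParseB
      PySem.Dict.empty).items.foldl pvClassify (([], [], [], []) :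
      List String × List String × List String × List String) with
  | (tables, columns, fks, procs) =>
    PySem.Str.join "\n" (tables ++ columns ++ fks ++ procs ++ ["MainSchema: Schema"])

-- ===== PRECONDITION & SPEC =====
def Spec_transform_ecore_to_rdbms (ecore_content : String) (out : String) : Prop := out = transform_ecore_to_rdbms_alt ecore_content
instance (ecore_content : String) (out : String) : Decidable (Spec_transform_ecore_to_rdbms ecore_content out) := by unfold Spec_transform_ecore_to_rdbms; infer_instance

-- ===== CLAIM (what is proved, stated in full; the proofs are below) =====
def Claim_equal_transform_ecore_to_rdbms : Prop := ∀ (ecore_content : String), Dom_transform_ecore_to_rdbms ecore_content → Spec_transform_ecore_to_rdbms ecore_content (transform_ecore_to_rdbms ecore_content)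

-- ===== LEMMAS AND PROOFS =====

-- emission functions, one per element type
def pvG1 (it : String × String) : List String :=
  if it.2 == "EClass" then [PySem.Str.replace it.1 "EClass" "" ++ ": Table"] else []
def pvG2 (it : String × String) : List String :=
  if it.2 == "EAttribute" then
    let col := PySem.Str.replace it.1 "EAttribute" ""
    if PySem.Str.isIn "id" (PySem.Str.lower it.1) then
      [col ++ ": Column", "PK_" ++ col ++ ": PrimaryKey"]
    else [col ++ ": Column"]
  else []
def pvG3 (it : String × String) : List String :=
  if it.2 == "EReference" then [PySem.Str.replace it.1 "EReference" "" ++ "_FK: ForeignKey"] else []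
def pvG4 (it : String × String) : List String :=
  if it.2 == "EOperation" then [PySem.Str.replace it.1 "EOperation" "" ++ ": StoredProcedure"] else []

-- splitting on a separator that does not occur returns the whole string
theorem pv_go_no_sep (sep : List Char) (fuel m : Nat) (l cur : List Char) (acc : List (List Char))
    (h : ¬ sep <:+: l) :
    PySem.Chars.splitOnMax.go sep fuel m l cur acc = ((cur.reverse ++ l) :: acc).reverse := by
  induction fuel generalizing l cur acc with
  | zero => simp [PySem.Chars.splitOnMax.go]
  | succ fuel ih =>
    cases l with
    | nil => simp [PySem.Chars.splitOnMax.go]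
    | cons c rest =>
      by_cases hm : m = 0
      · simp [PySem.Chars.splitOnMax.go, hm]
      · have hpre : sep.isPrefixOf (c :: rest) = false := by
          cases hc : sep.isPrefixOf (c :: rest) with
          | false => rfl
          | true => exact absurd (List.IsPrefix.isInfix (List.isPrefixOf_iff_prefix.mp hc)) h
        have hrest : ¬ sep <:+: rest := fun hi => h (hi.trans (List.suffix_cons c rest).isInfix)
        simp only [PySem.Chars.splitOnMax.go, hm, if_false, hpre, ih rest (c :: cur) acc hrest]
        simp

theorem pv_splitMax_no_sep (l : String) (h : PySem.Str.isIn ":" l = false) :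
    PySem.Str.splitMax? l ":" 1 = some [l] := by
  have hinf : ¬ (":".toList <:+: l.toList) := by
    intro hi
    rw [(PySem.Str.isIn_iff_infix ":" l).mpr hi] at h
    cases h
  simp only [PySem.Str.splitMax?, PySem.Chars.splitMax?, PySem.Chars.splitOnMax]
  norm_num
  rw [pv_go_no_sep _ _ _ _ _ _ hinf]
  simp

-- the two parse folds agree line by line
theorem pv_parse_step_eq (d : PySem.Dict String String) (line0 : String) :
    pvParseA d line0 = pvParseB d line0 := by
  unfold pvParseA pvParseB
  set line := PySem.Str.strip line0 with hl
  by_cases he : (line == "") = true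
  · have hline : line = "" := by simpa using he
    rw [hline]
    simp [pv_splitMax_no_sep "" (by decide)]
  · have he' : (line == "") = false := by simpa using he
    by_cases hin : PySem.Str.isIn ":" line = true
    · have hin' : PySem.Chars.isIn [':'] line.toList = true := by simpa using hin
      simp [he', hin']
    · have hfalse : PySem.Str.isIn ":" line = false := by simpa using hin
      have hfalse' : PySem.Chars.isIn [':'] line.toList = false := by simpa using hfalse
      rw [pv_splitMax_no_sep line hfalse]
      simp [he', hfalse']

-- the bucket fold computes the four filtered emission lists
theorem pv_bucket_fold (items : List (String × String)) (t c f p : List String) :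
    items.foldl pvClassify (t, c, f, p)
      = (t ++ items.flatMap pvG1, c ++ items.flatMap pvG2,
         f ++ items.flatMap pvG3, p ++ items.flatMap pvG4) := by
  induction items generalizing t c f p with
  | nil => simp
  | cons it rest ih =>
    simp only [List.foldl_cons, List.flatMap_cons]
    have hstep : ∀ t' c' f' p', pvClassify (t', c', f', p') it
        = (t' ++ pvG1 it, c' ++ pvG2 it, f' ++ pvG3 it, p' ++ pvG4 it) := by
      intro t' c' f' p'
      by_cases h1 : (it.2 == "EClass") = true
      · have : it.2 = "EClass" := by simpa using h1
        simp [pvClassify, pvG1, pvG2, pvG3, pvG4, this]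
      · by_cases h2 : (it.2 == "EAttribute") = true
        · have : it.2 = "EAttribute" := by simpa using h2
          simp [pvClassify, pvG1, pvG2, pvG3, pvG4, this]
          split <;> simp
        · by_cases h3 : (it.2 == "EReference") = true
          · have : it.2 = "EReference" := by simpa using h3
            simp [pvClassify, pvG1, pvG2, pvG3, pvG4, this]
          · by_cases h4 : (it.2 == "EOperation") = true
            · have : it.2 = "EOperation" := by simpa using h4
              simp [pvClassify, pvG1, pvG2, pvG3, pvG4, this]
            · simp only [Bool.not_eq_true] at h1 h2 h3 h4
              simp [pvClassify, pvG1, pvG2, pvG3, pvG4, h1, h2, h3, h4]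
    rw [hstep, ih]
    simp [List.append_assoc]

-- each of A's four scans appends one emission list
theorem pv_scan1 (items : List (String × String)) (acc : List String) :
    items.foldl (fun acc it =>
        if it.2 == "EClass" then acc ++ [PySem.Str.replace it.1 "EClass" "" ++ ": Table"]
        else acc) acc = acc ++ items.flatMap pvG1 := by
  rw [PySem.List.foldl_congr_mem _ _ (fun acc it => acc ++ pvG1 it) _ ?_,
      PySem.List.foldl_append_eq_flatMap]
  intro a it _
  by_cases h : (it.2 == "EClass") = true <;> simp [pvG1, h]

theorem pv_scan2 (items : List (String × String)) (acc : List String) :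
    items.foldl (fun acc it =>
        if it.2 == "EAttribute" then
          let column_name := PySem.Str.replace it.1 "EAttribute" ""
          if PySem.Str.isIn "id" (PySem.Str.lower it.1) then
            acc ++ [column_name ++ ": Column"] ++ ["PK_" ++ column_name ++ ": PrimaryKey"]
          else acc ++ [column_name ++ ": Column"]
        else acc) acc = acc ++ items.flatMap pvG2 := by
  rw [PySem.List.foldl_congr_mem _ _ (fun acc it => acc ++ pvG2 it) _ ?_,
      PySem.List.foldl_append_eq_flatMap]
  intro a it _
  by_cases h : (it.2 == "EAttribute") = true
  · simp only [pvG2, h, if_true]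
    split <;> simp
  · simp [pvG2, h]

theorem pv_scan3 (items : List (String × String)) (acc : List String) :
    items.foldl (fun acc it =>
        if it.2 == "EReference" then acc ++ [PySem.Str.replace it.1 "EReference" "" ++ "_FK" ++ ": ForeignKey"]
        else acc) acc = acc ++ items.flatMap pvG3 := by
  rw [PySem.List.foldl_congr_mem _ _ (fun acc it => acc ++ pvG3 it) _ ?_,
      PySem.List.foldl_append_eq_flatMap]
  intro a it _
  by_cases h : (it.2 == "EReference") = true
  · have hs : PySem.Str.replace it.1 "EReference" "" ++ "_FK" ++ ": ForeignKey"
        = PySem.Str.replace it.1 "EReference" "" ++ "_FK: ForeignKey" := by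
      rw [String.append_assoc]; rfl
    simp [pvG3, h, hs]
  · simp [pvG3, h]

theorem pv_scan4 (items : List (String × String)) (acc : List String) :
    items.foldl (fun acc it =>
        if it.2 == "EOperation" then acc ++ [PySem.Str.replace it.1 "EOperation" "" ++ ": StoredProcedure"]
        else acc) acc = acc ++ items.flatMap pvG4 := by
  rw [PySem.List.foldl_congr_mem _ _ (fun acc it => acc ++ pvG4 it) _ ?_,
      PySem.List.foldl_append_eq_flatMap]
  intro a it _
  by_cases h : (it.2 == "EOperation") = true <;> simp [pvG4, h]

-- ===== VERDICT (by name: the statement is the Claim_ definition above) =====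
theorem transform_ecore_to_rdbms_spec : Claim_equal_transform_ecore_to_rdbms := by
  intro s _
  unfold Spec_transform_ecore_to_rdbms transform_ecore_to_rdbms transform_ecore_to_rdbms_alt
  rw [PySem.List.foldl_congr_mem _ pvParseA pvParseB _
      (fun d line0 _ => pv_parse_step_eq d line0)]
  generalize (((PySem.Str.split? s "\n").getD []).foldl pvParseB PySem.Dict.empty :
      PySem.Dict String String).items = items
  rw [pv_scan1, pv_scan2, pv_scan3, pv_scan4, pv_bucket_fold]
  simp [List.append_assoc]
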